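-- pv_equiv track=rewrite | github.com/WitoldTrzeciakowski/Project_AAC | maximum_cycle.py | max_cycle_held_karp
-- ===== SOURCE A (Python) =====
-- import math
--
-- def max_cycle_held_karp(adj_matrix):
--
--     n = len(adj_matrix)
--     dp = [[-math.inf] * n for _ in range(1 << n)]
--     count = [[0] * n for _ in range(1 << n)]
--
--     for i in range(n):
--         dp[1 << i][i] = 0
--         count[1 << i][i] = 1
--
--     for mask in range(1 << n):
--         for u in range(n):
--             if not (mask & (1 << u)):
--                 continue
--             for v in range(n):
--                 if u == v or not (mask & (1 << v)):
--                     continue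
--                 if adj_matrix[v][u]:
--                     new_length = dp[mask ^ (1 << u)][v] + 1
--                     if new_length > dp[mask][u]:
--                         dp[mask][u] = new_length
--                         count[mask][u] = count[mask ^ (1 << u)][v]
--                     elif new_length == dp[mask][u]:
--                         count[mask][u] += count[mask ^ (1 << u)][v]
--
--     max_cycle_length = -math.inf
--     max_cycle_count = 0
--     final_mask = (1 << n) - 1
--
--     for u in range(n):
--         if adj_matrix[u][0]:
--             cycle_length = dp[final_mask][u] + 1
--             if cycle_length > max_cycle_length:
--                 max_cycle_length = cycle_length
--                 max_cycle_count = count[final_mask][u]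
--             elif cycle_length == max_cycle_length:
--                 max_cycle_count += count[final_mask][u]
--
--     return max_cycle_length if max_cycle_length != -math.inf else None, max_cycle_count
-- ===== SOURCE B (Python) =====
-- from functools import lru_cache
--
--
-- def max_cycle_held_karp(adj_matrix):
--     # Every reachable DP state in the Held-Karp table has path length popcount(mask)-1,
--     # so no length table / -inf relaxation is needed: count Hamiltonian paths directly
--     # by a memoized recursion and return (n, number of paths closed by an edge into 0).
--     n = len(adj_matrix)
--
--     @lru_cache(maxsize=None)
--     def ham(mask, u):
--         # number of paths visiting exactly the vertex set `mask` and ending at u (u in mask)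
--         if mask == 1 << u:
--             return 1
--         rest = mask ^ (1 << u)
--         return sum(ham(rest, v) for v in range(n) if rest >> v & 1 and adj_matrix[v][u])
--
--     full = (1 << n) - 1
--     total = sum(ham(full, u) for u in range(n) if adj_matrix[u][0])
--     return (n, total) if total > 0 else (None, 0)
-- ===== Notes on version B (the rewrite author's own statement) =====
-- stated objective: simpler
-- what changed: A fills dense (2^n) x n dp/count tables with -inf sentinels and a max/tie relaxation; B observes that every reachable state's length is popcount(mask)-1, drops the length table and relaxation entirely, and counts Hamiltonian paths by a single memoized recursion, returning (n, number of paths closed by an edge into vertex 0).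
import Mathlib
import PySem

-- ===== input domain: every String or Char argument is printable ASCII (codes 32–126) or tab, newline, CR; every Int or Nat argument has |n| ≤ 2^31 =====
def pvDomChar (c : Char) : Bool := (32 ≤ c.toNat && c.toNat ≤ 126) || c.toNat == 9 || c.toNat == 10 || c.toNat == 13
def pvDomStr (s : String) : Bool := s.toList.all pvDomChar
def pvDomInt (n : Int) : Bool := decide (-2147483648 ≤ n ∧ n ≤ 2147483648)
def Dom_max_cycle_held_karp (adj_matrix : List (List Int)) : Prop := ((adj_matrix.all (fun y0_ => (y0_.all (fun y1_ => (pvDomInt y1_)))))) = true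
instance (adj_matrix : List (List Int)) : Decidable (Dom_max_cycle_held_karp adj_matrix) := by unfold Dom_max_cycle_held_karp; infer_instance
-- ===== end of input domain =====

-- B replaces A's dense dp/count tables with -inf sentinels and max/tie relaxation by a single
-- memoized counting recursion (every reachable state's length is popcount(mask)-1, so the length
-- table disappears); objective: simpler, same exact return value.

-- ===== PORT A =====
-- Python lists dp/count are dense (2^n)×n tables indexed by in-range indices only; they are modeled
-- as index→value maps (exact for every read/write A performs).  -inf is modeled as `none`:
-- pvAdd1 is Python's `x + 1` (-inf+1 = -inf) and pvGtO Python's `>` on {-inf} ∪ ℤ, exactly.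
abbrev PvStA : Type := (Nat → Nat → Option Int) × (Nat → Nat → Int)

def pvGetA (adj : List (List Int)) (v u : Nat) : Int := (adj.getD v []).getD u 0  -- adj_matrix[v][u]; in range under Pre_

def pvAdd1 (x : Option Int) : Option Int := x.map (· + 1)

def pvGtO : Option Int → Option Int → Bool
  | some a, some b => a > b
  | some _, none => true
  | none, _ => false

def max_cycle_held_karp (adj_matrix : List (List Int)) : Option Int × Int :=
  let n := adj_matrix.length
  -- dp = [[-inf]*n ...], count = [[0]*n ...]; then dp[1<<i][i] = 0, count[1<<i][i] = 1
  let base : PvStA :=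
    (List.range n).foldl
      (fun s i =>
        (fun M w => if M = 2 ^ i ∧ w = i then some 0 else s.1 M w,
         fun M w => if M = 2 ^ i ∧ w = i then 1 else s.2 M w))
      (fun _ _ => none, fun _ _ => 0)
  let st :=
    (List.range (2 ^ n)).foldl
      (fun (s : PvStA) mask =>
        (List.range n).foldl
          (fun (s : PvStA) u =>
            if mask &&& 2 ^ u = 0 then s
            else
              (List.range n).foldl
                (fun (s : PvStA) v =>
                  if u = v ∨ mask &&& 2 ^ v = 0 then s
                  else
                    if pvGetA adj_matrix v u ≠ 0 then
                      let newLen := pvAdd1 (s.1 (mask ^^^ 2 ^ u) v)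
                      let srcCnt := s.2 (mask ^^^ 2 ^ u) v
                      if pvGtO newLen (s.1 mask u) then
                        (fun M w => if M = mask ∧ w = u then newLen else s.1 M w,
                         fun M w => if M = mask ∧ w = u then srcCnt else s.2 M w)
                      else if newLen = s.1 mask u then
                        let newCnt := s.2 mask u + srcCnt
                        (s.1,
                         fun M w => if M = mask ∧ w = u then newCnt else s.2 M w)
                      else s
                    else s)
                s)
          s)
      base
  let fullMask := 2 ^ n - 1
  (List.range n).foldl
    (fun acc u =>
      if pvGetA adj_matrix u 0 ≠ 0 then
        let cyc := pvAdd1 (st.1 fullMask u)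
        if pvGtO cyc acc.1 then (cyc, st.2 fullMask u)
        else if cyc = acc.1 then (acc.1, acc.2 + st.2 fullMask u)
        else acc
      else acc)
    ((none : Option Int), (0 : Int))

-- ===== PORT B =====
-- termination lemma for hamL's recursion (cited by the port's decreasing_by)
theorem pv_xor_lt {M u : Nat} (h : M.testBit u = true) : M ^^^ 2 ^ u < M := by
  apply Nat.lt_of_testBit u
  · simp [Nat.testBit_xor, h, Nat.testBit_two_pow_self]
  · exact h
  · intro j hj
    simp [Nat.testBit_xor, Nat.testBit_two_pow_of_ne hj.ne]

-- ham(mask, u): number of paths visiting exactly `mask`, ending at u (only called with u in mask;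
-- the testBit guard only makes the Lean recursion total — Python never reaches that branch)
def hamL (adj : List (List Int)) (mask u : Nat) : Int :=
  if hb : mask.testBit u = true then
    if mask = 2 ^ u then 1
    else
      (List.range adj.length).foldl
        (fun s v =>
          if (mask ^^^ 2 ^ u).testBit v = true ∧ pvGetA adj v u ≠ 0 then
            s + hamL adj (mask ^^^ 2 ^ u) v
          else s) 0
  else 0
termination_by mask
decreasing_by exact pv_xor_lt hb

def max_cycle_held_karp_alt (adj_matrix : List (List Int)) : Option Int × Int :=
  let n := adj_matrix.length
  let full := 2 ^ n - 1
  let total :=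
    (List.range n).foldl
      (fun s u => if pvGetA adj_matrix u 0 ≠ 0 then s + hamL adj_matrix full u else s) 0
  if 0 < total then (some (n : Int), total) else (none, 0)

-- ===== PRECONDITION & SPEC =====
-- Pre_ excludes exactly the ragged matrices on which Python A raises IndexError: A reads row v at
-- every column u < n with u ≠ v, and every row at column 0, so each row needs n columns except the
-- last one, which needs n-1 (when n ≥ 2).  It excludes no input A returns on.
def Pre_max_cycle_held_karp (adj_matrix : List (List Int)) : Prop :=
  ∀ i, i < adj_matrix.length →
    (if 2 ≤ adj_matrix.length ∧ i = adj_matrix.length - 1 then adj_matrix.length - 1 else adj_matrix.length)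
      ≤ (adj_matrix.getD i []).length

instance (adj_matrix : List (List Int)) : Decidable (Pre_max_cycle_held_karp adj_matrix) := by
  unfold Pre_max_cycle_held_karp; infer_instance

def pvWitness_max_cycle_held_karp : List (List Int) := [[0, 1], [1, 0]]

def Spec_max_cycle_held_karp (adj_matrix : List (List Int)) (out : Option Int × Int) : Prop := out = max_cycle_held_karp_alt adj_matrix
instance (adj_matrix : List (List Int)) (out : Option Int × Int) : Decidable (Spec_max_cycle_held_karp adj_matrix out) := by unfold Spec_max_cycle_held_karp; infer_instance

-- ===== CLAIM (what is proved, stated in full; the proofs are below) =====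
def Claim_equal_max_cycle_held_karp : Prop := ∀ (adj_matrix : List (List Int)), Dom_max_cycle_held_karp adj_matrix → Pre_max_cycle_held_karp adj_matrix → Spec_max_cycle_held_karp adj_matrix (max_cycle_held_karp adj_matrix)

-- ===== LEMMAS AND PROOFS =====

-- ---- basic bit lemmas ----
theorem pv_and_ne (M u : Nat) : M &&& 2 ^ u ≠ 0 ↔ M.testBit u = true := by
  rw [Nat.and_two_pow]
  cases h : M.testBit u <;> simp [h, (Nat.two_pow_pos u).ne']

theorem pv_and_eq (M u : Nat) : M &&& 2 ^ u = 0 ↔ M.testBit u = false := by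
  rw [Nat.and_two_pow]
  cases hb : M.testBit u <;> simp [hb, (Nat.two_pow_pos u).ne']

theorem pv_xor_ne (M u : Nat) : M ^^^ 2 ^ u ≠ M := by
  intro h
  have h2 : 2 ^ u = 0 := by
    have h3 := congrArg (fun x => M ^^^ x) h
    simpa [← Nat.xor_assoc, Nat.xor_self, Nat.zero_xor] using h3
  exact (Nat.two_pow_pos u).ne' h2

theorem pv_xor_testBit_self {M u : Nat} : (M ^^^ 2 ^ u).testBit u = !(M.testBit u) := by
  simp [Nat.testBit_xor, Nat.testBit_two_pow_self]

theorem pv_xor_testBit_other {M u v : Nat} (h : v ≠ u) : (M ^^^ 2 ^ u).testBit v = M.testBit v := by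
  simp [Nat.testBit_xor, (Nat.testBit_two_pow_of_ne (fun e => h e.symm) : (2 ^ u).testBit v = false)]

theorem pv_pow_and_pow {u v : Nat} (h : u ≠ v) : 2 ^ u &&& 2 ^ v = 0 := by
  rw [Nat.and_two_pow, Nat.testBit_two_pow_of_ne h]
  simp

-- ---- popcount over the first n bits ----
def pvPC (n M : Nat) : Nat := ((Finset.range n).filter (fun j => M.testBit j = true)).card

theorem pvPC_pow {n u : Nat} (hu : u < n) : pvPC n (2 ^ u) = 1 := by
  unfold pvPC
  have hset : (Finset.range n).filter (fun j => (2 ^ u : Nat).testBit j = true) = {u} := by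
    ext j
    simp only [Finset.mem_filter, Finset.mem_range, Finset.mem_singleton]
    constructor
    · rintro ⟨_, hb⟩
      by_contra hj
      rw [Nat.testBit_two_pow_of_ne (fun e => hj e.symm)] at hb
      exact Bool.false_ne_true hb
    · rintro rfl
      exact ⟨hu, Nat.testBit_two_pow_self⟩
  rw [hset, Finset.card_singleton]

theorem pvPC_xor {n M u : Nat} (hu : u < n) (hb : M.testBit u = true) :
    pvPC n (M ^^^ 2 ^ u) + 1 = pvPC n M := by
  unfold pvPC
  have hmem : u ∈ (Finset.range n).filter (fun j => M.testBit j = true) := by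
    simp [Finset.mem_filter, Finset.mem_range, hu, hb]
  have hset : (Finset.range n).filter (fun j => (M ^^^ 2 ^ u).testBit j = true)
      = ((Finset.range n).filter (fun j => M.testBit j = true)).erase u := by
    ext j
    by_cases hj : j = u
    · subst hj
      simp only [Finset.mem_filter, Finset.mem_erase, Finset.mem_range, pv_xor_testBit_self, hb]
      simp
    · simp only [Finset.mem_filter, Finset.mem_erase, Finset.mem_range, pv_xor_testBit_other hj, hj]
      tauto
  rw [hset, Finset.card_erase_of_mem hmem]
  have hpos : 0 < ((Finset.range n).filter (fun j => M.testBit j = true)).card :=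
    Finset.card_pos.mpr ⟨u, hmem⟩
  omega

theorem pvPC_full (n : Nat) : pvPC n (2 ^ n - 1) = n := by
  unfold pvPC
  have hset : (Finset.range n).filter (fun j => (2 ^ n - 1 : Nat).testBit j = true)
      = Finset.range n := by
    ext j
    simp [Finset.mem_filter, Finset.mem_range, Nat.testBit_two_pow_sub_one]
  rw [hset, Finset.card_range]

-- ---- the canonical per-cell table (pull form, mirrors what A computes cell by cell) ----
def pvRelaxA (acc : Option Int × Int) (nl : Option Int) (c : Int) : Option Int × Int :=
  if pvGtO nl acc.1 then (nl, c) else if nl = acc.1 then (acc.1, acc.2 + c) else acc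

def pvStepRow (adj : List (List Int)) (dpS : Nat → Option Int) (cS : Nat → Int) (mask u : Nat)
    (acc : Option Int × Int) (v : Nat) : Option Int × Int :=
  if u = v ∨ mask &&& 2 ^ v = 0 then acc
  else if pvGetA adj v u ≠ 0 then pvRelaxA acc (pvAdd1 (dpS v)) (cS v) else acc

def pvRowA (adj : List (List Int)) (dpS : Nat → Option Int) (cS : Nat → Int) (mask u : Nat)
    (l : List Nat) (acc : Option Int × Int) : Option Int × Int :=
  l.foldl (pvStepRow adj dpS cS mask u) acc

def pvSpec (adj : List (List Int)) (M u : Nat) : Option Int × Int :=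
  if h1 : M &&& 2 ^ u = 0 ∨ adj.length ≤ u then (none, 0)
  else if h2 : M = 2 ^ u then (some 0, 1)
  else
    pvRowA adj (fun v => (pvSpec adj (M ^^^ 2 ^ u) v).1) (fun v => (pvSpec adj (M ^^^ 2 ^ u) v).2)
      M u (List.range adj.length) (none, 0)
termination_by M
decreasing_by
  all_goals exact pv_xor_lt ((pv_and_ne M u).mp (fun h => h1 (Or.inl h)))

def pvInitA (n M u : Nat) : Option Int × Int := if M = 2 ^ u ∧ u < n then (some 0, 1) else (none, 0)

def pvTabA (adj : List (List Int)) (K M u : Nat) : Option Int × Int :=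
  if M < K then pvSpec adj M u else pvInitA adj.length M u

def pvSplit (f : Nat → Nat → Option Int × Int) : (Nat → Nat → Option Int) × (Nat → Nat → Int) :=
  (fun M u => (f M u).1, fun M u => (f M u).2)

theorem pvSpec_base (adj : List (List Int)) {u : Nat} (h : u < adj.length) :
    pvSpec adj (2 ^ u) u = (some 0, 1) := by
  rw [pvSpec]
  rw [dif_neg (by simp [(Nat.two_pow_pos u).ne', Nat.not_le.mpr h]), dif_pos rfl]

theorem pvSpec_out (adj : List (List Int)) (M u : Nat)
    (h : M.testBit u = false ∨ adj.length ≤ u) : pvSpec adj M u = (none, 0) := by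
  rw [pvSpec]
  apply dif_pos
  rcases h with h | h
  · exact Or.inl ((pv_and_eq M u).mpr h)
  · exact Or.inr h

-- ---- named copies of A's loop bodies (definitionally equal to the port's lambdas) ----
def pvVBodyA (adj : List (List Int)) (mask u : Nat) (s : PvStA) (v : Nat) : PvStA :=
  if u = v ∨ mask &&& 2 ^ v = 0 then s
  else
    if pvGetA adj v u ≠ 0 then
      let newLen := pvAdd1 (s.1 (mask ^^^ 2 ^ u) v)
      let srcCnt := s.2 (mask ^^^ 2 ^ u) v
      if pvGtO newLen (s.1 mask u) then
        (fun M w => if M = mask ∧ w = u then newLen else s.1 M w,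
         fun M w => if M = mask ∧ w = u then srcCnt else s.2 M w)
      else if newLen = s.1 mask u then
        let newCnt := s.2 mask u + srcCnt
        (s.1,
         fun M w => if M = mask ∧ w = u then newCnt else s.2 M w)
      else s
    else s

def pvUBodyA (adj : List (List Int)) (mask : Nat) (s : PvStA) (u : Nat) : PvStA :=
  if mask &&& 2 ^ u = 0 then s else (List.range adj.length).foldl (pvVBodyA adj mask u) s

def pvBaseA (adj : List (List Int)) : PvStA :=
  (List.range adj.length).foldl
    (fun s i =>
      (fun M w => if M = 2 ^ i ∧ w = i then some 0 else s.1 M w,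
       fun M w => if M = 2 ^ i ∧ w = i then 1 else s.2 M w))
    (fun _ _ => none, fun _ _ => 0)

def pvFinalA (adj : List (List Int)) (st : PvStA) : Option Int × Int :=
  (List.range adj.length).foldl
    (fun acc u =>
      if pvGetA adj u 0 ≠ 0 then
        let cyc := pvAdd1 (st.1 (2 ^ adj.length - 1) u)
        if pvGtO cyc acc.1 then (cyc, st.2 (2 ^ adj.length - 1) u)
        else if cyc = acc.1 then (acc.1, acc.2 + st.2 (2 ^ adj.length - 1) u)
        else acc
      else acc)
    ((none : Option Int), (0 : Int))

theorem pv_portA_eq (adj : List (List Int)) :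
    max_cycle_held_karp adj =
      pvFinalA adj
        ((List.range (2 ^ adj.length)).foldl
          (fun s mask => (List.range adj.length).foldl (pvUBodyA adj mask) s) (pvBaseA adj)) := rfl

theorem pvRowA_cons (adj : List (List Int)) (dpS : Nat → Option Int) (cS : Nat → Int)
    (mask u v : Nat) (l : List Nat) (acc : Option Int × Int) :
    pvRowA adj dpS cS mask u (v :: l) acc =
      pvRowA adj dpS cS mask u l (pvStepRow adj dpS cS mask u acc v) := rfl

theorem pvVBodyA_eq (adj : List (List Int)) (mask u : Nat) (s : PvStA) (v : Nat) :
    pvVBodyA adj mask u s v =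
      (fun M w => if M = mask ∧ w = u then
          (pvStepRow adj (fun x => s.1 (mask ^^^ 2 ^ u) x) (fun x => s.2 (mask ^^^ 2 ^ u) x)
            mask u (s.1 mask u, s.2 mask u) v).1
        else s.1 M w,
       fun M w => if M = mask ∧ w = u then
          (pvStepRow adj (fun x => s.1 (mask ^^^ 2 ^ u) x) (fun x => s.2 (mask ^^^ 2 ^ u) x)
            mask u (s.1 mask u, s.2 mask u) v).2
        else s.2 M w) := by
  obtain ⟨s1, s2⟩ := s
  unfold pvVBodyA pvStepRow pvRelaxA
  dsimp only
  split_ifs with hg hadj hgt heq <;>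
    refine Prod.ext ?_ ?_ <;> funext M w <;> by_cases hc : M = mask ∧ w = u <;>
      first
        | (obtain ⟨rfl, rfl⟩ := hc; simp)
        | simp [hc]

theorem pvVFoldA (adj : List (List Int)) (mask u : Nat) :
    ∀ (l : List Nat) (s : PvStA),
      List.foldl (pvVBodyA adj mask u) s l =
        (fun M w => if M = mask ∧ w = u then
            (pvRowA adj (fun x => s.1 (mask ^^^ 2 ^ u) x) (fun x => s.2 (mask ^^^ 2 ^ u) x)
              mask u l (s.1 mask u, s.2 mask u)).1
          else s.1 M w,
         fun M w => if M = mask ∧ w = u then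
            (pvRowA adj (fun x => s.1 (mask ^^^ 2 ^ u) x) (fun x => s.2 (mask ^^^ 2 ^ u) x)
              mask u l (s.1 mask u, s.2 mask u)).2
          else s.2 M w) := by
  intro l
  induction l with
  | nil =>
    intro s
    simp only [List.foldl_nil, pvRowA, List.foldl_nil]
    refine Prod.ext ?_ ?_ <;> funext M w <;> by_cases hc : M = mask ∧ w = u <;>
      first
        | (obtain ⟨rfl, rfl⟩ := hc; simp)
        | simp [hc]
  | cons v l ih =>
    intro s
    have hne : ¬(mask ^^^ 2 ^ u = mask) := pv_xor_ne mask u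
    rw [List.foldl_cons, pvVBodyA_eq adj mask u s v, ih, pvRowA_cons]
    simp only [hne, false_and, if_false, eq_self_iff_true, and_self, if_true]
    refine Prod.ext ?_ ?_ <;> funext M w <;> by_cases hc : M = mask ∧ w = u <;>
      simp [hc, Prod.mk.eta]

theorem pvRowA_skip (adj : List (List Int)) (dpS : Nat → Option Int) (cS : Nat → Int)
    (mask u : Nat) :
    ∀ (l : List Nat) (acc : Option Int × Int), (∀ v ∈ l, u = v ∨ mask &&& 2 ^ v = 0) →
      pvRowA adj dpS cS mask u l acc = acc := by
  intro l
  induction l with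
  | nil => intro acc _; rfl
  | cons v l ih =>
    intro acc h
    rw [pvRowA_cons]
    rw [show pvStepRow adj dpS cS mask u acc v = acc from if_pos (h v (List.mem_cons_self ..))]
    exact ih acc (fun x hx => h x (List.mem_cons_of_mem v hx))

theorem pvRowA_spec (adj : List (List Int)) {K u : Nat} (hu : u < adj.length)
    (hbit : K.testBit u = true) :
    pvRowA adj (fun v => (pvSpec adj (K ^^^ 2 ^ u) v).1) (fun v => (pvSpec adj (K ^^^ 2 ^ u) v).2)
        K u (List.range adj.length) (pvInitA adj.length K u) = pvSpec adj K u := by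
  by_cases hK : K = 2 ^ u
  · subst hK
    rw [pvSpec_base adj hu]
    unfold pvInitA
    rw [if_pos ⟨rfl, hu⟩]
    apply pvRowA_skip
    intro v _
    by_cases hv : u = v
    · exact Or.inl hv
    · exact Or.inr (pv_pow_and_pow hv)
  · have h1 : ¬(K &&& 2 ^ u = 0 ∨ adj.length ≤ u) := by
      push_neg
      exact ⟨(pv_and_ne K u).mpr hbit, hu⟩
    conv_rhs => rw [pvSpec]
    rw [dif_neg h1, dif_neg hK]
    unfold pvInitA
    rw [if_neg (fun hc => hK hc.1)]

set_option maxHeartbeats 2000000 in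
theorem pvUFoldA (adj : List (List Int)) (K : Nat) :
    ∀ (l : List Nat), l.Nodup → (∀ w ∈ l, w < adj.length) →
      ∀ (s : PvStA),
        (∀ M w, M < K → s.1 M w = (pvSpec adj M w).1 ∧ s.2 M w = (pvSpec adj M w).2) →
        (∀ w ∈ l, s.1 K w = (pvInitA adj.length K w).1 ∧ s.2 K w = (pvInitA adj.length K w).2) →
        List.foldl (pvUBodyA adj K) s l =
          (fun M w => if M = K ∧ w ∈ l ∧ K &&& 2 ^ w ≠ 0 then (pvSpec adj K w).1 else s.1 M w,
           fun M w => if M = K ∧ w ∈ l ∧ K &&& 2 ^ w ≠ 0 then (pvSpec adj K w).2 else s.2 M w) := by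
  intro l
  induction l with
  | nil =>
    intro _ _ s _ _
    simp only [List.foldl_nil, List.not_mem_nil, false_and, and_false, if_false]
  | cons u l ih =>
    intro hnd hb s hsrc hstart
    rw [List.foldl_cons]
    by_cases hbit : K &&& 2 ^ u = 0
    · rw [show pvUBodyA adj K s u = s from if_pos hbit]
      rw [ih hnd.of_cons (fun w hw => hb w (List.mem_cons_of_mem u hw)) s hsrc
        (fun w hw => hstart w (List.mem_cons_of_mem u hw))]
      refine Prod.ext ?_ ?_
      · funext M w
        show (if M = K ∧ w ∈ l ∧ K &&& 2 ^ w ≠ 0 then (pvSpec adj K w).1 else s.1 M w)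
            = (if M = K ∧ w ∈ u :: l ∧ K &&& 2 ^ w ≠ 0 then (pvSpec adj K w).1 else s.1 M w)
        by_cases hc : M = K ∧ w ∈ l ∧ K &&& 2 ^ w ≠ 0
        · rw [if_pos hc, if_pos ⟨hc.1, List.mem_cons_of_mem u hc.2.1, hc.2.2⟩]
        · rw [if_neg hc, if_neg (fun hc2 => (List.mem_cons.mp hc2.2.1).elim
            (fun h => hc2.2.2 (by rw [h]; exact hbit)) (fun h => hc ⟨hc2.1, h, hc2.2.2⟩))]
      · funext M w
        show (if M = K ∧ w ∈ l ∧ K &&& 2 ^ w ≠ 0 then (pvSpec adj K w).2 else s.2 M w)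
            = (if M = K ∧ w ∈ u :: l ∧ K &&& 2 ^ w ≠ 0 then (pvSpec adj K w).2 else s.2 M w)
        by_cases hc : M = K ∧ w ∈ l ∧ K &&& 2 ^ w ≠ 0
        · rw [if_pos hc, if_pos ⟨hc.1, List.mem_cons_of_mem u hc.2.1, hc.2.2⟩]
        · rw [if_neg hc, if_neg (fun hc2 => (List.mem_cons.mp hc2.2.1).elim
            (fun h => hc2.2.2 (by rw [h]; exact hbit)) (fun h => hc ⟨hc2.1, h, hc2.2.2⟩))]
    · -- process u: apply the inner-loop characterisation
      have hu : u < adj.length := hb u (List.mem_cons_self ..)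
      have hbitt : K.testBit u = true := (pv_and_ne K u).mp hbit
      have hlt : K ^^^ 2 ^ u < K := pv_xor_lt hbitt
      rw [show pvUBodyA adj K s u = (List.range adj.length).foldl (pvVBodyA adj K u) s from
        if_neg hbit]
      rw [pvVFoldA adj K u (List.range adj.length) s]
      have hdp : (fun x => s.1 (K ^^^ 2 ^ u) x) = fun x => (pvSpec adj (K ^^^ 2 ^ u) x).1 := by
        funext x; exact (hsrc _ x hlt).1
      have hcn : (fun x => s.2 (K ^^^ 2 ^ u) x) = fun x => (pvSpec adj (K ^^^ 2 ^ u) x).2 := by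
        funext x; exact (hsrc _ x hlt).2
      have hst : (s.1 K u, s.2 K u) = pvInitA adj.length K u := by
        have h := hstart u (List.mem_cons_self ..)
        exact Prod.ext h.1 h.2
      rw [hdp, hcn, hst, pvRowA_spec adj hu hbitt]
      have hsrc' : ∀ M w, M < K →
          (if M = K ∧ w = u then (pvSpec adj K u).1 else s.1 M w) = (pvSpec adj M w).1 ∧
          (if M = K ∧ w = u then (pvSpec adj K u).2 else s.2 M w) = (pvSpec adj M w).2 := by
        intro M w hM
        have hMne : ¬(M = K ∧ w = u) := fun hc => absurd hM (by rw [hc.1]; exact lt_irrefl K)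
        rw [if_neg hMne, if_neg hMne]
        exact hsrc M w hM
      have hstart' : ∀ w ∈ l,
          (if K = K ∧ w = u then (pvSpec adj K u).1 else s.1 K w) = (pvInitA adj.length K w).1 ∧
          (if K = K ∧ w = u then (pvSpec adj K u).2 else s.2 K w) = (pvInitA adj.length K w).2 := by
        intro w hw
        have hwu : ¬(K = K ∧ w = u) := fun hc => (List.nodup_cons.mp hnd).1 (by rw [← hc.2]; exact hw)
        rw [if_neg hwu, if_neg hwu]
        exact hstart w (List.mem_cons_of_mem u hw)
      rw [ih hnd.of_cons (fun w hw => hb w (List.mem_cons_of_mem u hw))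
        (fun M w => if M = K ∧ w = u then (pvSpec adj K u).1 else s.1 M w,
         fun M w => if M = K ∧ w = u then (pvSpec adj K u).2 else s.2 M w) hsrc' hstart']
      refine Prod.ext ?_ ?_
      · funext M w
        show (if M = K ∧ w ∈ l ∧ K &&& 2 ^ w ≠ 0 then (pvSpec adj K w).1
              else if M = K ∧ w = u then (pvSpec adj K u).1 else s.1 M w)
            = (if M = K ∧ w ∈ u :: l ∧ K &&& 2 ^ w ≠ 0 then (pvSpec adj K w).1 else s.1 M w)
        by_cases hcl : M = K ∧ w ∈ l ∧ K &&& 2 ^ w ≠ 0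
        · rw [if_pos hcl, if_pos ⟨hcl.1, List.mem_cons_of_mem u hcl.2.1, hcl.2.2⟩]
        · by_cases hcu : M = K ∧ w = u
          · rw [if_neg hcl, if_pos hcu,
              if_pos ⟨hcu.1, by rw [hcu.2]; exact List.mem_cons_self .., by rw [hcu.2]; exact hbit⟩]
            rw [hcu.2]
          · rw [if_neg hcl, if_neg hcu,
              if_neg (fun hcc => (List.mem_cons.mp hcc.2.1).elim
                (fun h => hcu ⟨hcc.1, h⟩) (fun h => hcl ⟨hcc.1, h, hcc.2.2⟩))]
      · funext M w
        show (if M = K ∧ w ∈ l ∧ K &&& 2 ^ w ≠ 0 then (pvSpec adj K w).2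
              else if M = K ∧ w = u then (pvSpec adj K u).2 else s.2 M w)
            = (if M = K ∧ w ∈ u :: l ∧ K &&& 2 ^ w ≠ 0 then (pvSpec adj K w).2 else s.2 M w)
        by_cases hcl : M = K ∧ w ∈ l ∧ K &&& 2 ^ w ≠ 0
        · rw [if_pos hcl, if_pos ⟨hcl.1, List.mem_cons_of_mem u hcl.2.1, hcl.2.2⟩]
        · by_cases hcu : M = K ∧ w = u
          · rw [if_neg hcl, if_pos hcu,
              if_pos ⟨hcu.1, by rw [hcu.2]; exact List.mem_cons_self .., by rw [hcu.2]; exact hbit⟩]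
            rw [hcu.2]
          · rw [if_neg hcl, if_neg hcu,
              if_neg (fun hcc => (List.mem_cons.mp hcc.2.1).elim
                (fun h => hcu ⟨hcc.1, h⟩) (fun h => hcl ⟨hcc.1, h, hcc.2.2⟩))]

def pvMaskBodyA (adj : List (List Int)) (s : PvStA) (mask : Nat) : PvStA :=
  (List.range adj.length).foldl (pvUBodyA adj mask) s

theorem pvMaskStepA (adj : List (List Int)) (K : Nat) :
    pvMaskBodyA adj (pvSplit (pvTabA adj K)) K = pvSplit (pvTabA adj (K + 1)) := by
  unfold pvMaskBodyA
  rw [pvUFoldA adj K (List.range adj.length) (List.nodup_range)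
    (fun w hw => List.mem_range.mp hw) (pvSplit (pvTabA adj K))
    (by intro M w hM; simp [pvSplit, pvTabA, if_pos hM])
    (by intro w _; simp [pvSplit, pvTabA, lt_irrefl])]
  refine Prod.ext ?_ ?_ <;> funext M w <;> dsimp only [pvSplit] <;>
    by_cases hc : M = K ∧ w ∈ List.range adj.length ∧ K &&& 2 ^ w ≠ 0
  case _ =>
    obtain ⟨rfl, _, _⟩ := hc
    simp_all [pvTabA, List.mem_range]
  case _ =>
    rw [if_neg hc]
    unfold pvTabA
    by_cases hM : M < K
    · rw [if_pos hM, if_pos (Nat.lt_succ_of_lt hM)]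
    · by_cases hMK : M = K
      · subst hMK
        rw [if_neg hM, if_pos (Nat.lt_succ_self M)]
        have : pvSpec adj M w = pvInitA adj.length M w := by
          by_cases hw : w < adj.length
          · have hbw : M.testBit w = false := by
              by_contra hbt
              exact hc ⟨rfl, List.mem_range.mpr hw,
                (pv_and_ne M w).mpr (Bool.of_not_eq_false hbt)⟩
            rw [pvSpec_out adj M w (Or.inl hbw)]
            unfold pvInitA
            rw [if_neg (fun hcc => by
              have : (2 ^ w).testBit w = true := Nat.testBit_two_pow_self
              rw [← hcc.1] at this
              simp [this] at hbw)]
          · rw [pvSpec_out adj M w (Or.inr (Nat.not_lt.mp hw))]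
            unfold pvInitA
            rw [if_neg (fun hcc => hw hcc.2)]
        rw [this]
      · rw [if_neg hM, if_neg (by omega)]
  case _ =>
    obtain ⟨rfl, _, _⟩ := hc
    simp_all [pvTabA, List.mem_range]
  case _ =>
    rw [if_neg hc]
    unfold pvTabA
    by_cases hM : M < K
    · rw [if_pos hM, if_pos (Nat.lt_succ_of_lt hM)]
    · by_cases hMK : M = K
      · subst hMK
        rw [if_neg hM, if_pos (Nat.lt_succ_self M)]
        have : pvSpec adj M w = pvInitA adj.length M w := by
          by_cases hw : w < adj.length
          · have hbw : M.testBit w = false := by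
              by_contra hbt
              exact hc ⟨rfl, List.mem_range.mpr hw,
                (pv_and_ne M w).mpr (Bool.of_not_eq_false hbt)⟩
            rw [pvSpec_out adj M w (Or.inl hbw)]
            unfold pvInitA
            rw [if_neg (fun hcc => by
              have : (2 ^ w).testBit w = true := Nat.testBit_two_pow_self
              rw [← hcc.1] at this
              simp [this] at hbw)]
          · rw [pvSpec_out adj M w (Or.inr (Nat.not_lt.mp hw))]
            unfold pvInitA
            rw [if_neg (fun hcc => hw hcc.2)]
        rw [this]
      · rw [if_neg hM, if_neg (by omega)]

theorem pvBaseAFold :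
    ∀ (l : List Nat) (s : PvStA),
      List.foldl
        (fun (s : PvStA) i =>
          (fun M w => if M = 2 ^ i ∧ w = i then some 0 else s.1 M w,
           fun M w => if M = 2 ^ i ∧ w = i then 1 else s.2 M w)) s l =
      (fun M w => if M = 2 ^ w ∧ w ∈ l then some 0 else s.1 M w,
       fun M w => if M = 2 ^ w ∧ w ∈ l then 1 else s.2 M w) := by
  intro l
  induction l with
  | nil => intro s; simp only [List.foldl_nil, List.not_mem_nil, and_false, if_false]
  | cons i l ih =>
    intro s
    rw [List.foldl_cons, ih]
    refine Prod.ext ?_ ?_ <;> funext M w <;> dsimp only <;>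
      by_cases h1 : M = 2 ^ w ∧ w ∈ l <;> by_cases h2 : M = 2 ^ i ∧ w = i <;>
      by_cases h3 : M = 2 ^ w ∧ w ∈ i :: l <;> simp_all [List.mem_cons] <;> aesop

theorem pvBaseA_eq (adj : List (List Int)) : pvBaseA adj = pvSplit (pvTabA adj 0) := by
  unfold pvBaseA
  rw [pvBaseAFold]
  refine Prod.ext ?_ ?_ <;> funext M w <;>
    simp only [pvSplit, pvTabA, Nat.not_lt_zero, if_false, pvInitA, List.mem_range] <;>
    by_cases hc : M = 2 ^ w ∧ w < adj.length <;> simp [hc]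

theorem pvMainA (adj : List (List Int)) :
    ∀ K, (List.range K).foldl (pvMaskBodyA adj) (pvBaseA adj) = pvSplit (pvTabA adj K) := by
  intro K
  induction K with
  | zero => simp [pvBaseA_eq]
  | succ K ih =>
    rw [List.range_succ, List.foldl_append, ih, List.foldl_cons, List.foldl_nil, pvMaskStepA]

-- ---- generic characterisation of A's relax-fold when all finite candidates share one length ----
theorem pvRelaxA_noop (acc : Option Int × Int) : pvRelaxA acc (pvAdd1 none) 0 = acc := by
  obtain ⟨a1, a2⟩ := acc
  cases a1 <;> simp [pvRelaxA, pvGtO, pvAdd1]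

theorem pvFoldRelaxAux (dpS : Nat → Option Int) (cS : Nat → Int) (cond : Nat → Prop)
    [DecidablePred cond] (L0 : Int) :
    ∀ (l : List Nat),
      (∀ v ∈ l, cond v → (dpS v = none ∧ cS v = 0) ∨ (dpS v = some L0 ∧ 0 < cS v)) →
      ∀ (S0 : Int), 0 ≤ S0 →
        l.foldl (fun acc v => if cond v then pvRelaxA acc (pvAdd1 (dpS v)) (cS v) else acc)
            (if 0 < S0 then some (L0 + 1) else none, S0)
          = (if 0 < S0 + (l.map (fun v => if cond v then cS v else 0)).sum then some (L0 + 1)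
             else none,
             S0 + (l.map (fun v => if cond v then cS v else 0)).sum) := by
  intro l
  induction l with
  | nil => intro _ S0 _; simp
  | cons v l ih =>
    intro h S0 hS0
    rw [List.foldl_cons, List.map_cons, List.sum_cons]
    by_cases hc : cond v
    · rcases h v (List.mem_cons_self ..) hc with ⟨hd, hc0⟩ | ⟨hd, hcpos⟩
      · rw [if_pos hc, hd, hc0, pvRelaxA_noop,
          ih (fun x hx => h x (List.mem_cons_of_mem v hx)) S0 hS0, if_pos hc]
        rw [zero_add]
      · have hstep : pvRelaxA (if 0 < S0 then some (L0 + 1) else none, S0)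
            (pvAdd1 (some L0)) (cS v)
            = (if 0 < S0 + cS v then some (L0 + 1) else none, S0 + cS v) := by
          by_cases h0 : 0 < S0
          · rw [if_pos h0, if_pos (by omega)]
            simp [pvRelaxA, pvGtO, pvAdd1]
          · have hz : S0 = 0 := le_antisymm (by omega) hS0
            subst hz
            rw [if_neg h0, if_pos (by omega)]
            simp [pvRelaxA, pvGtO, pvAdd1]
        rw [if_pos hc, hd, hstep,
          ih (fun x hx => h x (List.mem_cons_of_mem v hx)) (S0 + cS v) (by omega), if_pos hc]
        rw [add_assoc]
    · rw [if_neg hc, ih (fun x hx => h x (List.mem_cons_of_mem v hx)) S0 hS0, if_neg hc]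
      rw [zero_add]

theorem pvFoldRelax (dpS : Nat → Option Int) (cS : Nat → Int) (cond : Nat → Prop)
    [DecidablePred cond] (L0 : Int) (l : List Nat)
    (h : ∀ v ∈ l, cond v → (dpS v = none ∧ cS v = 0) ∨ (dpS v = some L0 ∧ 0 < cS v)) :
    l.foldl (fun acc v => if cond v then pvRelaxA acc (pvAdd1 (dpS v)) (cS v) else acc)
        ((none : Option Int), (0 : Int))
      = (if 0 < (l.map (fun v => if cond v then cS v else 0)).sum then some (L0 + 1) else none,
         (l.map (fun v => if cond v then cS v else 0)).sum) := by
  have := pvFoldRelaxAux dpS cS cond L0 l h 0 le_rfl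
  simpa using this

-- ---- sum form of B's add-fold ----
theorem pvFoldAddIf (cond : Nat → Prop) [DecidablePred cond] (f : Nat → Int) :
    ∀ (l : List Nat) (a : Int),
      l.foldl (fun s v => if cond v then s + f v else s) a
        = a + (l.map (fun v => if cond v then f v else 0)).sum := by
  intro l
  induction l with
  | nil => intro a; simp
  | cons v l ih =>
    intro a
    rw [List.foldl_cons, List.map_cons, List.sum_cons]
    by_cases hc : cond v
    · rw [if_pos hc, if_pos hc, ih]
      ring
    · rw [if_neg hc, if_neg hc, ih]
      ring

theorem pvSumNonneg : ∀ (l : List Int), (∀ x ∈ l, 0 ≤ x) → 0 ≤ l.sum := by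
  intro l
  induction l with
  | nil => intro _; simp
  | cons x l ih =>
    intro h
    rw [List.sum_cons]
    have := h x (List.mem_cons_self ..)
    have := ih (fun y hy => h y (List.mem_cons_of_mem x hy))
    omega

-- ---- the key invariant: pvSpec's count is hamL and its dp is determined by it ----
theorem pvInv (adj : List (List Int)) :
    ∀ M, M < 2 ^ adj.length → ∀ u, u < adj.length →
      pvSpec adj M u
          = (if 0 < hamL adj M u then some ((pvPC adj.length M : Int) - 1) else none,
             hamL adj M u)
        ∧ 0 ≤ hamL adj M u := by
  intro M
  induction M using Nat.strong_induction_on with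
  | _ M IH =>
    intro hM u hu
    by_cases hb : M.testBit u = true
    · by_cases hbase : M = 2 ^ u
      · have hham : hamL adj M u = 1 := by
          rw [hamL, dif_pos hb, if_pos hbase]
        subst hbase
        rw [pvSpec_base adj hu, hham, pvPC_pow hu]
        norm_num
      · have hKlt : M ^^^ 2 ^ u < M := pv_xor_lt hb
        have hK2 : M ^^^ 2 ^ u < 2 ^ adj.length := lt_trans hKlt hM
        have h1 : ¬(M &&& 2 ^ u = 0 ∨ adj.length ≤ u) := by
          push_neg
          exact ⟨(pv_and_ne M u).mpr hb, hu⟩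
        -- unfold pvSpec one step
        have hspec : pvSpec adj M u =
            pvRowA adj (fun v => (pvSpec adj (M ^^^ 2 ^ u) v).1)
              (fun v => (pvSpec adj (M ^^^ 2 ^ u) v).2) M u (List.range adj.length) (none, 0) := by
          rw [pvSpec]
          rw [dif_neg h1, dif_neg hbase]
        -- the step function matches the generic relax-fold shape
        have hstepfun :
            pvStepRow adj (fun v => (pvSpec adj (M ^^^ 2 ^ u) v).1)
                (fun v => (pvSpec adj (M ^^^ 2 ^ u) v).2) M u
              = fun acc v =>
                  if ¬(u = v ∨ M &&& 2 ^ v = 0) ∧ pvGetA adj v u ≠ 0 then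
                    pvRelaxA acc (pvAdd1 ((pvSpec adj (M ^^^ 2 ^ u) v).1))
                      ((pvSpec adj (M ^^^ 2 ^ u) v).2)
                  else acc := by
          funext acc v
          unfold pvStepRow
          split_ifs with hg hadj hcnd hcnd <;> first | rfl | tauto
        have hcondiff : ∀ v : Nat,
            ((M ^^^ 2 ^ u).testBit v = true ∧ pvGetA adj v u ≠ 0)
              ↔ (¬(u = v ∨ M &&& 2 ^ v = 0) ∧ pvGetA adj v u ≠ 0) := by
          intro v
          by_cases hvu : v = u
          · subst hvu
            rw [pv_xor_testBit_self, hb]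
            simp
          · rw [pv_xor_testBit_other hvu]
            constructor
            · rintro ⟨hbv, hadj⟩
              refine ⟨?_, hadj⟩
              rintro (he | hz)
              · exact hvu he.symm
              · rw [(pv_and_eq M v).mp hz] at hbv
                exact Bool.false_ne_true hbv
            · rintro ⟨hg, hadj⟩
              push_neg at hg
              exact ⟨(pv_and_ne M v).mp hg.2, hadj⟩
        -- the dp/count sources satisfy pvFoldRelax's hypothesis
        have hhyp : ∀ v ∈ List.range adj.length,
            (¬(u = v ∨ M &&& 2 ^ v = 0) ∧ pvGetA adj v u ≠ 0) →
              ((pvSpec adj (M ^^^ 2 ^ u) v).1 = none ∧ (pvSpec adj (M ^^^ 2 ^ u) v).2 = 0)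
              ∨ ((pvSpec adj (M ^^^ 2 ^ u) v).1 = some ((pvPC adj.length (M ^^^ 2 ^ u) : Int) - 1)
                  ∧ 0 < (pvSpec adj (M ^^^ 2 ^ u) v).2) := by
          intro v hv _
          obtain ⟨hsp, hnn⟩ := IH (M ^^^ 2 ^ u) hKlt hK2 v (List.mem_range.mp hv)
          by_cases hpos : 0 < hamL adj (M ^^^ 2 ^ u) v
          · right
            rw [hsp, if_pos hpos]
            exact ⟨rfl, hpos⟩
          · left
            have hz : hamL adj (M ^^^ 2 ^ u) v = 0 := by omega
            rw [hsp, if_neg hpos, hz]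
            exact ⟨rfl, rfl⟩
        have hfold := pvFoldRelax (fun v => (pvSpec adj (M ^^^ 2 ^ u) v).1)
          (fun v => (pvSpec adj (M ^^^ 2 ^ u) v).2)
          (fun v => ¬(u = v ∨ M &&& 2 ^ v = 0) ∧ pvGetA adj v u ≠ 0)
          ((pvPC adj.length (M ^^^ 2 ^ u) : Int) - 1) (List.range adj.length) hhyp
        -- hamL unfolds to the same sum
        have hham : hamL adj M u
            = ((List.range adj.length).map
                (fun v => if ¬(u = v ∨ M &&& 2 ^ v = 0) ∧ pvGetA adj v u ≠ 0 then
                    (pvSpec adj (M ^^^ 2 ^ u) v).2 else 0)).sum := by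
          rw [hamL, dif_pos hb, if_neg hbase]
          rw [pvFoldAddIf (fun v => (M ^^^ 2 ^ u).testBit v = true ∧ pvGetA adj v u ≠ 0)
            (fun v => hamL adj (M ^^^ 2 ^ u) v) (List.range adj.length) 0, zero_add]
          apply congrArg
          apply List.map_congr_left
          intro v hv
          have hiff := hcondiff v
          by_cases hc : ¬(u = v ∨ M &&& 2 ^ v = 0) ∧ pvGetA adj v u ≠ 0
          · rw [if_pos (hiff.mpr hc), if_pos hc,
              ((IH (M ^^^ 2 ^ u) hKlt hK2 v (List.mem_range.mp hv)).1 ▸ rfl :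
                (pvSpec adj (M ^^^ 2 ^ u) v).2 = hamL adj (M ^^^ 2 ^ u) v).symm]
          · rw [if_neg (fun hx => hc (hiff.mp hx)), if_neg hc]
        have hLval : ((pvPC adj.length (M ^^^ 2 ^ u) : Int) - 1) + 1
            = (pvPC adj.length M : Int) - 1 := by
          have := pvPC_xor hu hb
          push_cast [← this]
          ring
        have hnn : 0 ≤ hamL adj M u := by
          rw [hham]
          apply pvSumNonneg
          intro x hx
          obtain ⟨v, hv, rfl⟩ := List.mem_map.mp hx
          by_cases hc : ¬(u = v ∨ M &&& 2 ^ v = 0) ∧ pvGetA adj v u ≠ 0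
          · rw [if_pos hc]
            have := (IH (M ^^^ 2 ^ u) hKlt hK2 v (List.mem_range.mp hv))
            rw [this.1]
            exact this.2
          · rw [if_neg hc]
        refine ⟨?_, hnn⟩
        rw [hspec]
        unfold pvRowA
        rw [hstepfun, hfold, ← hham, hLval]
    · have hb' : M.testBit u = false := by
        cases h : M.testBit u
        · rfl
        · exact absurd h hb
      have hham : hamL adj M u = 0 := by
        rw [hamL, dif_neg hb]
      rw [pvSpec_out adj M u (Or.inl hb'), hham]
      norm_num

theorem pv_portB_eq (adj : List (List Int)) :
    max_cycle_held_karp_alt adj =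
      (if 0 < (List.range adj.length).foldl
            (fun s u => if pvGetA adj u 0 ≠ 0 then s + hamL adj (2 ^ adj.length - 1) u else s) 0
       then (some (adj.length : Int),
             (List.range adj.length).foldl
               (fun s u => if pvGetA adj u 0 ≠ 0 then s + hamL adj (2 ^ adj.length - 1) u else s) 0)
       else (none, 0)) := rfl

-- ===== VERDICT (by name: the statement is the Claim_ definition above) =====
theorem max_cycle_held_karp_spec : Claim_equal_max_cycle_held_karp := by
  intro adj _ _
  unfold Spec_max_cycle_held_karp
  rw [pv_portA_eq,
    show (fun (s : PvStA) mask => (List.range adj.length).foldl (pvUBodyA adj mask) s)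
        = pvMaskBodyA adj from rfl,
    pvMainA adj (2 ^ adj.length)]
  have hfull : 2 ^ adj.length - 1 < 2 ^ adj.length := Nat.sub_lt (Nat.two_pow_pos _) Nat.one_pos
  have hAstep : (fun (acc : Option Int × Int) u => if pvGetA adj u 0 ≠ 0 then
        let cyc := pvAdd1 ((pvSplit (pvTabA adj (2 ^ adj.length))).1 (2 ^ adj.length - 1) u)
        if pvGtO cyc acc.1 then
          (cyc, (pvSplit (pvTabA adj (2 ^ adj.length))).2 (2 ^ adj.length - 1) u)
        else if cyc = acc.1 then
          (acc.1, acc.2 + (pvSplit (pvTabA adj (2 ^ adj.length))).2 (2 ^ adj.length - 1) u)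
        else acc
      else acc)
      = fun (acc : Option Int × Int) u => if pvGetA adj u 0 ≠ 0 then
          pvRelaxA acc (pvAdd1 ((pvSpec adj (2 ^ adj.length - 1) u).1))
            ((pvSpec adj (2 ^ adj.length - 1) u).2) else acc := by
    funext acc u
    simp only [pvSplit, pvTabA, if_pos hfull]
    rfl
  have hhyp : ∀ u ∈ List.range adj.length, pvGetA adj u 0 ≠ 0 →
      ((pvSpec adj (2 ^ adj.length - 1) u).1 = none
        ∧ (pvSpec adj (2 ^ adj.length - 1) u).2 = 0)
      ∨ ((pvSpec adj (2 ^ adj.length - 1) u).1 = some ((adj.length : Int) - 1)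
        ∧ 0 < (pvSpec adj (2 ^ adj.length - 1) u).2) := by
    intro u hu _
    obtain ⟨hsp, hnn⟩ := pvInv adj (2 ^ adj.length - 1) hfull u (List.mem_range.mp hu)
    rw [pvPC_full] at hsp
    by_cases hpos : 0 < hamL adj (2 ^ adj.length - 1) u
    · right
      rw [hsp, if_pos hpos]
      exact ⟨rfl, hpos⟩
    · left
      have hz : hamL adj (2 ^ adj.length - 1) u = 0 := by omega
      rw [hsp, if_neg hpos, hz]
      exact ⟨rfl, rfl⟩
  unfold pvFinalA
  rw [hAstep,
    pvFoldRelax (fun u => (pvSpec adj (2 ^ adj.length - 1) u).1)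
      (fun u => (pvSpec adj (2 ^ adj.length - 1) u).2)
      (fun u => pvGetA adj u 0 ≠ 0) ((adj.length : Int) - 1) (List.range adj.length) hhyp]
  -- the right-hand side: B's sum
  rw [pv_portB_eq, pvFoldAddIf (fun u => pvGetA adj u 0 ≠ 0)
    (fun u => hamL adj (2 ^ adj.length - 1) u) (List.range adj.length) 0, zero_add]
  have hmapeq : (List.range adj.length).map
        (fun u => if pvGetA adj u 0 ≠ 0 then (pvSpec adj (2 ^ adj.length - 1) u).2 else 0)
      = (List.range adj.length).map
        (fun u => if pvGetA adj u 0 ≠ 0 then hamL adj (2 ^ adj.length - 1) u else 0) := by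
    apply List.map_congr_left
    intro u hu
    obtain ⟨hsp, _⟩ := pvInv adj (2 ^ adj.length - 1) hfull u (List.mem_range.mp hu)
    rw [hsp]
  rw [hmapeq]
  set T := ((List.range adj.length).map
    (fun u => if pvGetA adj u 0 ≠ 0 then hamL adj (2 ^ adj.length - 1) u else 0)).sum with hT
  have hTnn : 0 ≤ T := by
    rw [hT]
    apply pvSumNonneg
    intro x hx
    obtain ⟨v, hv, rfl⟩ := List.mem_map.mp hx
    by_cases hc : pvGetA adj v 0 ≠ 0
    · rw [if_pos hc]
      exact (pvInv adj (2 ^ adj.length - 1) hfull v (List.mem_range.mp hv)).2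
    · rw [if_neg hc]
  by_cases hpos : 0 < T
  · rw [if_pos hpos, if_pos hpos]
    refine Prod.ext ?_ rfl
    show some ((adj.length : Int) - 1 + 1) = some (adj.length : Int)
    norm_num
  · rw [if_neg hpos, if_neg hpos]
    have hz : T = 0 := by omega
    rw [hz]
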